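-- pv_equiv track=rewrite | github.com/dommad/pyviscount | pyviscount/ground_truth.py | digest_by_trypsin
-- ===== SOURCE A (Python) =====
-- def digest_by_trypsin(proseq, miss_cleavage):
--     """digest the protein according to trypsin rules"""
--     peptides = []
--     cut_sites = [0]
--     for i in range(0, len(proseq) - 1):
--         if proseq[i] == 'K' and proseq[i + 1] != 'P':
--             cut_sites.append(i + 1)
--         elif proseq[i] == 'R' and proseq[i + 1] != 'P':
--             cut_sites.append(i + 1)
--
--     if cut_sites[-1] != len(proseq):
--         cut_sites.append(len(proseq))
--
--     if len(cut_sites) > 2: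
--         if miss_cleavage == 0:
--             for j in range(0, len(cut_sites) - 1):
--                 peptides.append(proseq[cut_sites[j]:cut_sites[j + 1]])
--
--         elif miss_cleavage == 1:
--             for j in range(0, len(cut_sites) - 2):
--                 peptides.append(proseq[cut_sites[j]:cut_sites[j + 1]])
--                 peptides.append(proseq[cut_sites[j]:cut_sites[j + 2]])
--
--             peptides.append(proseq[cut_sites[-2]:cut_sites[-1]])
--
--         elif miss_cleavage == 2:
--             for j in range(0, len(cut_sites) - 3):
--                 peptides.append(proseq[cut_sites[j]:cut_sites[j + 1]])
--                 peptides.append(proseq[cut_sites[j]:cut_sites[j + 2]])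
--                 peptides.append(proseq[cut_sites[j]:cut_sites[j + 3]])
--
--             peptides.append(proseq[cut_sites[-3]:cut_sites[-2]])
--             peptides.append(proseq[cut_sites[-3]:cut_sites[-1]])
--             peptides.append(proseq[cut_sites[-2]:cut_sites[-1]])
--     else:
--         peptides.append(proseq)
--     return peptides
-- ===== SOURCE B (Python) =====
-- def digest_by_trypsin(proseq, miss_cleavage):
--     """digest the protein according to trypsin rules"""
--     n = len(proseq)
--     sites = [0] + [i + 1 for i in range(n - 1)
--                    if proseq[i] in 'KR' and proseq[i + 1] != 'P']
--     if n > 0: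
--         sites.append(n)
--     if len(sites) <= 2:
--         return [proseq]
--     if miss_cleavage not in (0, 1, 2):
--         return []
--     frags = [proseq[sites[j]:sites[j + 1]] for j in range(len(sites) - 1)]
--     peptides = []
--     for j in range(len(frags)):
--         pep = ''
--         for w in range(min(miss_cleavage + 1, len(frags) - j)):
--             pep += frags[j + w]
--             peptides.append(pep)
--     return peptides
-- ===== Notes on version B (the rewrite author's own statement) =====
-- stated objective: simpler
-- what changed: B builds the list of fully-cleaved fragments once and emits, for each start fragment, the concatenation of 1..miss_cleavage+1 consecutive fragments in one uniform double loop, replacing A's three unrolled per-miss_cleavage branches of index slicing with hand-appended tail peptides.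
import Mathlib
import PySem

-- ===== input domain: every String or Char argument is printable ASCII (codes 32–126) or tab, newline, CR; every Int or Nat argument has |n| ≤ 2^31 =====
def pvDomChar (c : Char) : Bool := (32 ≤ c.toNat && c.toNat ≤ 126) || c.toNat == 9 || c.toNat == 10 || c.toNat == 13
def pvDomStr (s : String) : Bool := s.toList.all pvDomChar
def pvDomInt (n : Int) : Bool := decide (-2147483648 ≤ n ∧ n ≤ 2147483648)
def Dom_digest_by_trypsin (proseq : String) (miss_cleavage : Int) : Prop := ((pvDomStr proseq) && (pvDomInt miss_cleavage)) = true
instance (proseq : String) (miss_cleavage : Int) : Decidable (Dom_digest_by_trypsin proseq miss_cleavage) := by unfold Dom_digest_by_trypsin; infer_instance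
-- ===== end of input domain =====

-- B replaces A's three unrolled missed-cleavage branches by one uniform emission over the list of
-- fully-cleaved fragments (concatenating adjacent fragments instead of re-slicing); objective: simpler.

-- ===== PORT A =====
-- proseq[cut_sites[j]:cut_sites[k]] (Python indexing into the sites list, then a string slice)
def pvSliceAt (cs : List Char) (sites : List Int) (j k : Int) : String :=
  String.ofList (PySem.List.slice cs (some (PySem.List.pyGetD sites j 0))
    (some (PySem.List.pyGetD sites k 0)))

def digest_by_trypsin (proseq : String) (miss_cleavage : Int) : List String :=
  let cs := proseq.toList
  let n : Int := (cs.length : Int)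
  let cut_sites : List Int :=
    (PySem.List.pyRange 0 (n - 1) 1).foldl (fun acc i =>
      if PySem.List.pyGetD cs i ' ' = 'K' ∧ PySem.List.pyGetD cs (i + 1) ' ' ≠ 'P' then
        acc ++ [i + 1]
      else if PySem.List.pyGetD cs i ' ' = 'R' ∧ PySem.List.pyGetD cs (i + 1) ' ' ≠ 'P' then
        acc ++ [i + 1]
      else acc) [0]
  let cut_sites : List Int :=
    if PySem.List.pyGetD cut_sites (-1) 0 ≠ n then cut_sites ++ [n] else cut_sites
  if 2 < cut_sites.length then
    if miss_cleavage = 0 then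
      (PySem.List.pyRange 0 ((cut_sites.length : Int) - 1) 1).foldl
        (fun ps j => ps ++ [pvSliceAt cs cut_sites j (j + 1)]) []
    else if miss_cleavage = 1 then
      ((PySem.List.pyRange 0 ((cut_sites.length : Int) - 2) 1).foldl
        (fun ps j => ps ++ [pvSliceAt cs cut_sites j (j + 1),
                            pvSliceAt cs cut_sites j (j + 2)]) [])
        ++ [pvSliceAt cs cut_sites (-2) (-1)]
    else if miss_cleavage = 2 then
      ((PySem.List.pyRange 0 ((cut_sites.length : Int) - 3) 1).foldl
        (fun ps j => ps ++ [pvSliceAt cs cut_sites j (j + 1),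
                            pvSliceAt cs cut_sites j (j + 2),
                            pvSliceAt cs cut_sites j (j + 3)]) [])
        ++ [pvSliceAt cs cut_sites (-3) (-2), pvSliceAt cs cut_sites (-3) (-1),
            pvSliceAt cs cut_sites (-2) (-1)]
    else []
  else [proseq]

-- ===== PORT B =====
def digest_by_trypsin_alt (proseq : String) (miss_cleavage : Int) : List String :=
  let cs := proseq.toList
  let n : Int := (cs.length : Int)
  let sites : List Int :=
    0 :: ((PySem.List.pyRange 0 (n - 1) 1).filter (fun i =>
      (PySem.List.pyGetD cs i ' ' == 'K' || PySem.List.pyGetD cs i ' ' == 'R') &&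
        PySem.List.pyGetD cs (i + 1) ' ' != 'P')).map (fun i => i + 1)
  let sites : List Int := if 0 < n then sites ++ [n] else sites
  if sites.length ≤ 2 then [proseq]
  else if miss_cleavage ≠ 0 ∧ miss_cleavage ≠ 1 ∧ miss_cleavage ≠ 2 then []
  else
    let frags : List (List Char) :=
      (PySem.List.pyRange 0 ((sites.length : Int) - 1) 1).map (fun j =>
        PySem.List.slice cs (some (PySem.List.pyGetD sites j 0))
          (some (PySem.List.pyGetD sites (j + 1) 0)))
    (PySem.List.pyRange 0 ((frags.length : Int)) 1).foldl (fun ps j =>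
      ((PySem.List.pyRange 0 (min (miss_cleavage + 1) ((frags.length : Int) - j)) 1).foldl
        (fun (st : List Char × List String) w =>
          (st.1 ++ PySem.List.pyGetD frags (j + w) [],
           st.2 ++ [String.ofList (st.1 ++ PySem.List.pyGetD frags (j + w) [])]))
        (([] : List Char), ps)).2) []

-- ===== PRECONDITION & SPEC =====
def Spec_digest_by_trypsin (proseq : String) (miss_cleavage : Int) (out : List String) : Prop := out = digest_by_trypsin_alt proseq miss_cleavage
instance (proseq : String) (miss_cleavage : Int) (out : List String) : Decidable (Spec_digest_by_trypsin proseq miss_cleavage out) := by unfold Spec_digest_by_trypsin; infer_instance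

-- ===== CLAIM (what is proved, stated in full; the proofs are below) =====
def Claim_equal_digest_by_trypsin : Prop := ∀ (proseq : String) (miss_cleavage : Int), Dom_digest_by_trypsin proseq miss_cleavage → Spec_digest_by_trypsin proseq miss_cleavage (digest_by_trypsin proseq miss_cleavage)

-- ===== LEMMAS AND PROOFS =====

def pvSg (t : List Int) (j : Nat) : Int := t.getD j 0
def pvFr (cs : List Char) (t : List Int) (j : Nat) : List Char :=
  PySem.List.slice cs (some (pvSg t j)) (some (pvSg t (j + 1)))
lemma pvGlue {α : Type} (xs : List α) {a b c : Int} (h0 : 0 ≤ a) (hab : a ≤ b) (hbc : b ≤ c) :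
    PySem.List.slice xs (some a) (some b) ++ PySem.List.slice xs (some b) (some c)
      = PySem.List.slice xs (some a) (some c) := by
  have h0b : 0 ≤ b := le_trans h0 hab
  have h0c : 0 ≤ c := le_trans h0b hbc
  rw [PySem.List.slice_toNat xs h0 h0b, PySem.List.slice_toNat xs h0b h0c,
    PySem.List.slice_toNat xs h0 h0c]
  have h2 : List.drop b.toNat xs = List.drop (b.toNat - a.toNat) (List.drop a.toNat xs) := by
    rw [List.drop_drop]; congr 1; omega
  have h1 : c.toNat - a.toNat = (b.toNat - a.toNat) + (c.toNat - b.toNat) := by omega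
  rw [h2, h1, List.take_add]

lemma pvCat (cs : List Char) (t : List Int) (m : Nat)
    (mono : ∀ j k : Nat, j < k → k < t.length → pvSg t j < pvSg t k)
    (nn : ∀ j : Nat, 0 ≤ pvSg t j) (hlen : t.length = m + 1) :
    ∀ (j w : Nat), j + w ≤ m →
      ((List.range w).map (fun i => pvFr cs t (j + i))).flatten
        = PySem.List.slice cs (some (pvSg t j)) (some (pvSg t (j + w))) := by
  intro j w
  induction w with
  | zero =>
    intro _
    simp only [Nat.add_zero, List.range_zero, List.map_nil, List.flatten_nil]
    rw [PySem.List.slice_toNat cs (nn j) (nn j)]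
    simp
  | succ w ih =>
    intro hw
    have hw' : j + w ≤ m := by omega
    rw [List.range_succ, List.map_append, List.flatten_append, ih hw']
    have hab : pvSg t j ≤ pvSg t (j + w) := by
      rcases Nat.eq_zero_or_pos w with h | h
      · subst h; simp
      · exact le_of_lt (mono j (j + w) (by omega) (by omega))
    have hbc : pvSg t (j + w) ≤ pvSg t (j + w + 1) := by
      exact le_of_lt (mono (j + w) (j + w + 1) (by omega) (by omega))
    simp only [List.map_cons, List.map_nil, List.flatten_cons, List.flatten_nil, List.append_nil]
    have : pvFr cs t (j + w) = PySem.List.slice cs (some (pvSg t (j + w))) (some (pvSg t (j + w + 1))) := rfl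
    rw [this, pvGlue cs (nn j) hab hbc]
    congr 3

def pvP (cs : List Char) (t : List Int) (j k : Nat) : String :=
  String.ofList (PySem.List.slice cs (some (pvSg t j)) (some (pvSg t k)))

lemma pvSliceAt_cast (cs : List Char) (t : List Int) (j k : Nat) :
    pvSliceAt cs t (j : Int) (k : Int) = pvP cs t j k := by
  simp [pvSliceAt, pvP, pvSg, PySem.List.pyGetD_natCast]


lemma pvInnerFold (g : Nat → List Char) (k : Nat) (ps : List String) :
    (List.range k).foldl (fun (st : List Char × List String) w =>
        (st.1 ++ g w, st.2 ++ [String.ofList (st.1 ++ g w)])) (([] : List Char), ps)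
      = (((List.range k).map g).flatten,
         ps ++ (List.range k).map (fun w => String.ofList (((List.range (w + 1)).map g).flatten))) := by
  induction k with
  | zero => simp
  | succ k ih =>
    rw [List.range_succ, List.foldl_append, ih]
    simp [List.range_succ]

lemma pvCutFold (cs : List Char) (n : Int) :
    (PySem.List.pyRange 0 (n - 1) 1).foldl (fun acc i =>
      if PySem.List.pyGetD cs i ' ' = 'K' ∧ PySem.List.pyGetD cs (i + 1) ' ' ≠ 'P' then
        acc ++ [i + 1]
      else if PySem.List.pyGetD cs i ' ' = 'R' ∧ PySem.List.pyGetD cs (i + 1) ' ' ≠ 'P' then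
        acc ++ [i + 1]
      else acc) [0]
    = 0 :: ((PySem.List.pyRange 0 (n - 1) 1).filter (fun i =>
        (PySem.List.pyGetD cs i ' ' == 'K' || PySem.List.pyGetD cs i ' ' == 'R') &&
          PySem.List.pyGetD cs (i + 1) ' ' != 'P')).map (fun i => i + 1) := by
  have hfun : (fun (acc : List Int) i =>
      if PySem.List.pyGetD cs i ' ' = 'K' ∧ PySem.List.pyGetD cs (i + 1) ' ' ≠ 'P' then
        acc ++ [i + 1]
      else if PySem.List.pyGetD cs i ' ' = 'R' ∧ PySem.List.pyGetD cs (i + 1) ' ' ≠ 'P' then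
        acc ++ [i + 1]
      else acc)
    = (fun (acc : List Int) i =>
      if ((PySem.List.pyGetD cs i ' ' == 'K' || PySem.List.pyGetD cs i ' ' == 'R') &&
          PySem.List.pyGetD cs (i + 1) ' ' != 'P') = true then acc ++ [i + 1] else acc) := by
    funext acc i
    by_cases h1 : PySem.List.pyGetD cs i ' ' = 'K' <;>
      by_cases h2 : PySem.List.pyGetD cs i ' ' = 'R' <;>
        by_cases h3 : PySem.List.pyGetD cs (i + 1) ' ' = 'P' <;>
          simp [h1, h2, h3]
  rw [hfun, PySem.List.foldl_append_if]
  simp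

lemma pvLastNe (n : Int) (tl : List Int) (htl : ∀ x ∈ tl, x < n) (hnil : n ≤ 0 → tl = [])
    (h0n : 0 ≤ n) :
    (PySem.List.pyGetD (0 :: tl) (-1) 0 ≠ n) ↔ 0 < n := by
  rw [PySem.List.pyGetD_neg_one (0 :: tl) 0 (by simp)]
  constructor
  · intro h
    rcases lt_or_ge 0 n with hn | hn
    · exact hn
    · exfalso
      have hn0 : n = 0 := le_antisymm hn h0n
      have : tl = [] := hnil (le_of_eq hn0)
      subst this
      simp [hn0] at h
  · intro hn
    have hmem := List.getLast_mem (l := 0 :: tl) (by simp)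
    rcases List.mem_cons.mp hmem with h0 | hx
    · omega
    · exact ne_of_lt (htl _ hx)

-- negative Python indices into the sites list
lemma pvSliceAt_neg (cs : List Char) (t : List Int) (k l : Nat) (hk : 0 < l) (hl : l < k)
    (hkl : k ≤ t.length) :
    pvSliceAt cs t (-(k : Int)) (-(l : Int)) = pvP cs t (t.length - k) (t.length - l) := by
  unfold pvSliceAt pvP pvSg
  rw [PySem.List.pyGetD_neg_natCast t k 0 (by omega) (by omega),
      PySem.List.pyGetD_neg_natCast t l 0 (by omega) (by omega),
      List.getD_eq_getElem _ _ (by omega), List.getD_eq_getElem _ _ (by omega)]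

lemma pvA0 (cs : List Char) (t : List Int) (m : Nat) (hlen : t.length = m + 1) :
    (PySem.List.pyRange 0 ((t.length : Int) - 1) 1).foldl
      (fun ps j => ps ++ [pvSliceAt cs t j (j + 1)]) []
    = (List.range m).map (fun j => pvP cs t j (j + 1)) := by
  have e1 : ((t.length : Int) - 1) = ((m : Nat) : Int) := by rw [hlen]; push_cast; ring
  rw [e1, PySem.List.pyRange_zero_nat, List.foldl_map, PySem.List.foldl_append_singleton_eq_map]
  simp only [List.nil_append]
  apply List.map_congr_left
  intro j _
  rw [show ((j : Int) + 1) = ((j + 1 : Nat) : Int) by push_cast; ring, pvSliceAt_cast]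

lemma pvA1 (cs : List Char) (t : List Int) (m : Nat) (hlen : t.length = m + 1) (hm : 2 ≤ m) :
    ((PySem.List.pyRange 0 ((t.length : Int) - 2) 1).foldl
      (fun ps j => ps ++ [pvSliceAt cs t j (j + 1), pvSliceAt cs t j (j + 2)]) [])
      ++ [pvSliceAt cs t (-2) (-1)]
    = ((List.range (m - 1)).flatMap (fun j => [pvP cs t j (j + 1), pvP cs t j (j + 2)]))
      ++ [pvP cs t (m - 1) m] := by
  have e1 : ((t.length : Int) - 2) = ((m - 1 : Nat) : Int) := by
    rw [hlen]; push_cast [Nat.cast_sub (by omega : 1 ≤ m)]; ring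
  rw [e1, PySem.List.pyRange_zero_nat, List.foldl_map, PySem.List.foldl_append_eq_flatMap]
  simp only [List.nil_append]
  congr 1
  · apply List.flatMap_congr
    intro j _
    rw [show ((j : Int) + 1) = ((j + 1 : Nat) : Int) by push_cast; ring,
        show ((j : Int) + 2) = ((j + 2 : Nat) : Int) by push_cast; ring,
        pvSliceAt_cast, pvSliceAt_cast]
  · rw [show (-2 : Int) = -((2 : Nat) : Int) by norm_num,
        show (-1 : Int) = -((1 : Nat) : Int) by norm_num,
        pvSliceAt_neg cs t 2 1 (by omega) (by omega) (by omega)]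
    congr 2 <;> omega

lemma pvA2 (cs : List Char) (t : List Int) (m : Nat) (hlen : t.length = m + 1) (hm : 2 ≤ m) :
    ((PySem.List.pyRange 0 ((t.length : Int) - 3) 1).foldl
      (fun ps j => ps ++ [pvSliceAt cs t j (j + 1), pvSliceAt cs t j (j + 2),
                          pvSliceAt cs t j (j + 3)]) [])
      ++ [pvSliceAt cs t (-3) (-2), pvSliceAt cs t (-3) (-1), pvSliceAt cs t (-2) (-1)]
    = ((List.range (m - 2)).flatMap (fun j =>
          [pvP cs t j (j + 1), pvP cs t j (j + 2), pvP cs t j (j + 3)]))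
      ++ [pvP cs t (m - 2) (m - 1), pvP cs t (m - 2) m, pvP cs t (m - 1) m] := by
  have e1 : ((t.length : Int) - 3) = ((m - 2 : Nat) : Int) := by
    rw [hlen]; push_cast [Nat.cast_sub hm]; ring
  rw [e1, PySem.List.pyRange_zero_nat, List.foldl_map, PySem.List.foldl_append_eq_flatMap]
  simp only [List.nil_append]
  congr 1
  · apply List.flatMap_congr
    intro j _
    rw [show ((j : Int) + 1) = ((j + 1 : Nat) : Int) by push_cast; ring,
        show ((j : Int) + 2) = ((j + 2 : Nat) : Int) by push_cast; ring,
        show ((j : Int) + 3) = ((j + 3 : Nat) : Int) by push_cast; ring,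
        pvSliceAt_cast, pvSliceAt_cast, pvSliceAt_cast]
  · rw [show (-3 : Int) = -((3 : Nat) : Int) by norm_num,
        show (-2 : Int) = -((2 : Nat) : Int) by norm_num,
        show (-1 : Int) = -((1 : Nat) : Int) by norm_num,
        pvSliceAt_neg cs t 3 2 (by omega) (by omega) (by omega),
        pvSliceAt_neg cs t 3 1 (by omega) (by omega) (by omega),
        pvSliceAt_neg cs t 2 1 (by omega) (by omega) (by omega)]
    have e2 : t.length - 3 = m - 2 := by omega
    have e3 : t.length - 2 = m - 1 := by omega
    have e4 : t.length - 1 = m := by omega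
    rw [e2, e3, e4]

lemma pvBside (cs : List Char) (t : List Int) (m : Nat)
    (mono : ∀ j k : Nat, j < k → k < t.length → pvSg t j < pvSg t k)
    (nn : ∀ j : Nat, 0 ≤ pvSg t j) (hlen : t.length = m + 1) (mc : Int) (hmc0 : 0 ≤ mc) :
    (let frags : List (List Char) :=
      (PySem.List.pyRange 0 ((t.length : Int) - 1) 1).map (fun j =>
        PySem.List.slice cs (some (PySem.List.pyGetD t j 0))
          (some (PySem.List.pyGetD t (j + 1) 0)));
    (PySem.List.pyRange 0 ((frags.length : Int)) 1).foldl (fun ps j =>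
      ((PySem.List.pyRange 0 (min (mc + 1) ((frags.length : Int) - j)) 1).foldl
        (fun (st : List Char × List String) w =>
          (st.1 ++ PySem.List.pyGetD frags (j + w) [],
           st.2 ++ [String.ofList (st.1 ++ PySem.List.pyGetD frags (j + w) [])]))
        (([] : List Char), ps)).2) [])
    = (List.range m).flatMap (fun j =>
        (List.range (min (mc.toNat + 1) (m - j))).map (fun w => pvP cs t j (j + w + 1))) := by
  have e1 : ((t.length : Int) - 1) = ((m : Nat) : Int) := by rw [hlen]; push_cast; ring
  have hfr : (PySem.List.pyRange 0 ((t.length : Int) - 1) 1).map (fun j =>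
        PySem.List.slice cs (some (PySem.List.pyGetD t j 0))
          (some (PySem.List.pyGetD t (j + 1) 0)))
      = (List.range m).map (pvFr cs t) := by
    rw [e1, PySem.List.pyRange_zero_nat, List.map_map]
    apply List.map_congr_left
    intro j _
    have hc : ((j : Int) + 1) = ((j + 1 : Nat) : Int) := by push_cast; ring
    simp only [Function.comp_apply, hc, PySem.List.pyGetD_natCast]
    rfl
  simp only [hfr, List.length_map, List.length_range]
  rw [PySem.List.pyRange_zero_nat, List.foldl_map]
  rw [PySem.List.foldl_congr_mem (List.range m) _
    (fun ps (j : Nat) => ps ++ (List.range (min (mc.toNat + 1) (m - j))).map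
      (fun w => pvP cs t j (j + w + 1))) [] ?_]
  · rw [PySem.List.foldl_append_eq_flatMap]
    simp
  · intro ps j hj
    have hjm : j < m := List.mem_range.mp hj
    have hmin : min (mc + 1) ((m : Int) - (j : Int)) = ((min (mc.toNat + 1) (m - j) : Nat) : Int) := by
      omega
    rw [hmin, PySem.List.pyRange_zero_nat, List.foldl_map]
    set kN := min (mc.toNat + 1) (m - j) with hk
    have hkm : kN ≤ m - j := by omega
    rw [pvInnerFold (fun w => PySem.List.pyGetD ((List.range m).map (pvFr cs t)) ((j : Int) + (w : Int)) []) kN ps]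
    simp only []
    congr 1
    apply List.map_congr_left
    intro w hw
    have hwk : w < kN := List.mem_range.mp hw
    congr 1
    have hg : ∀ i ∈ List.range (w + 1),
        PySem.List.pyGetD ((List.range m).map (pvFr cs t)) ((j : Int) + (i : Int)) []
          = pvFr cs t (j + i) := by
      intro i hi
      have him : i < w + 1 := List.mem_range.mp hi
      have hc : ((j : Int) + (i : Int)) = ((j + i : Nat) : Int) := by push_cast; ring
      rw [hc, PySem.List.pyGetD_natCast,
        List.getD_eq_getElem _ _ (by simp; omega)]
      simp
    rw [List.map_congr_left hg, pvCat cs t m mono nn hlen j (w + 1) (by omega),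
      show j + (w + 1) = j + w + 1 from rfl]

lemma pvM0 (h : Nat → Nat → String) (m : Nat) :
    (List.range m).flatMap (fun j => (List.range (min 1 (m - j))).map (fun w => h j (j + w + 1)))
    = (List.range m).map (fun j => h j (j + 1)) := by
  rw [show (List.range m).map (fun j => h j (j + 1))
      = (List.range m).flatMap (fun j => [h j (j + 1)]) from List.map_eq_flatMap]
  apply List.flatMap_congr
  intro j hj
  have hjm : j < m := List.mem_range.mp hj
  rw [show min 1 (m - j) = 1 by omega]
  rfl

lemma pvM1 (h : Nat → Nat → String) (m : Nat) (hm : 2 ≤ m) :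
    (List.range m).flatMap (fun j => (List.range (min 2 (m - j))).map (fun w => h j (j + w + 1)))
    = ((List.range (m - 1)).flatMap (fun j => [h j (j + 1), h j (j + 2)])) ++ [h (m - 1) m] := by
  rw [show List.range m = List.range (m - 1) ++ [m - 1] by
        rw [← List.range_succ]; congr 1; omega,
      List.flatMap_append]
  congr 1
  · apply List.flatMap_congr
    intro j hj
    have hjm : j < m - 1 := List.mem_range.mp hj
    rw [show min 2 (m - j) = 2 by omega]
    rfl
  · simp only [List.flatMap_cons, List.flatMap_nil, List.append_nil]
    rw [show min 2 (m - (m - 1)) = 1 by omega]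
    simp only [List.range_one, List.map_cons, List.map_nil]
    rw [show m - 1 + 0 + 1 = m by omega]

lemma pvM2 (h : Nat → Nat → String) (m : Nat) (hm : 2 ≤ m) :
    (List.range m).flatMap (fun j => (List.range (min 3 (m - j))).map (fun w => h j (j + w + 1)))
    = ((List.range (m - 2)).flatMap (fun j => [h j (j + 1), h j (j + 2), h j (j + 3)]))
      ++ [h (m - 2) (m - 1), h (m - 2) m, h (m - 1) m] := by
  rw [show List.range m = (List.range (m - 2) ++ [m - 2]) ++ [m - 1] by
        rw [← List.range_succ, show (m - 2).succ = m - 1 by omega, ← List.range_succ]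
        congr 1; omega,
      List.flatMap_append, List.flatMap_append]
  rw [List.append_assoc]
  congr 1
  · apply List.flatMap_congr
    intro j hj
    have hjm : j < m - 2 := List.mem_range.mp hj
    rw [show min 3 (m - j) = 3 by omega]
    rfl
  · simp only [List.flatMap_cons, List.flatMap_nil, List.append_nil]
    rw [show min 3 (m - (m - 2)) = 2 by omega, show min 3 (m - (m - 1)) = 1 by omega]
    simp only [List.range_succ, List.range_zero, List.nil_append,
      List.map_append, List.map_cons, List.map_nil]
    rw [show m - 2 + 0 + 1 = m - 1 by omega, show m - 1 + 1 = m by omega]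
    rfl

-- ===== VERDICT (by name: the statement is the Claim_ definition above) =====
theorem digest_by_trypsin_spec : Claim_equal_digest_by_trypsin := by
  intro proseq mc _
  unfold Spec_digest_by_trypsin digest_by_trypsin digest_by_trypsin_alt
  simp only [pvCutFold]
  set cs := proseq.toList with hcs
  set n : Int := (cs.length : Int) with hn'
  set tl : List Int := ((PySem.List.pyRange 0 (n - 1) 1).filter (fun i =>
      (PySem.List.pyGetD cs i ' ' == 'K' || PySem.List.pyGetD cs i ' ' == 'R') &&
        PySem.List.pyGetD cs (i + 1) ' ' != 'P')).map (fun i => i + 1) with htl'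
  have h0n : 0 ≤ n := by positivity
  have htl : ∀ x ∈ tl, 0 < x ∧ x < n := by
    intro x hx
    rw [htl'] at hx
    obtain ⟨i, hi, rfl⟩ := List.mem_map.mp hx
    have := PySem.List.mem_pyRange_one.mp (List.mem_filter.mp hi).1
    omega
  have hnil : n ≤ 0 → tl = [] := by
    intro h
    rw [htl', PySem.List.pyRange_one_eq_nil (by omega)]
    rfl
  simp only [pvLastNe n tl (fun x hx => (htl x hx).2) hnil h0n]
  by_cases hn : 0 < n
  · rw [if_pos hn]
    set t : List Int := (0 :: tl) ++ [n] with ht'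
    have hpw_tl : tl.Pairwise (· < ·) := by
      rw [htl']
      refine List.pairwise_map.mpr (((PySem.List.pairwise_lt_pyRange_one 0 (n - 1)).filter _).imp ?_)
      intro a b hab
      omega
    have hpw : t.Pairwise (· < ·) := by
      rw [ht', List.pairwise_append]
      refine ⟨List.pairwise_cons.mpr ⟨fun x hx => (htl x hx).1, hpw_tl⟩, by simp, ?_⟩
      intro a ha b hb
      rw [List.mem_singleton] at hb
      subst hb
      rcases List.mem_cons.mp ha with rfl | h
      · exact hn
      · exact (htl _ h).2
    have mono : ∀ j k : Nat, j < k → k < t.length → pvSg t j < pvSg t k := by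
      intro j k hjk hk
      have hj : j < t.length := lt_trans hjk hk
      rw [pvSg, pvSg, List.getD_eq_getElem _ _ hj, List.getD_eq_getElem _ _ hk]
      exact List.pairwise_iff_getElem.mp hpw j k hj hk hjk
    have hmem_nn : ∀ x ∈ t, 0 ≤ x := by
      intro x hx
      rw [ht'] at hx
      rcases List.mem_append.mp hx with h | h
      · rcases List.mem_cons.mp h with rfl | h
        · exact le_rfl
        · exact le_of_lt (htl x h).1
      · rw [List.mem_singleton] at h; omega
    have nn : ∀ j : Nat, 0 ≤ pvSg t j := by
      intro j
      by_cases hj : j < t.length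
      · rw [pvSg, List.getD_eq_getElem _ _ hj]
        exact hmem_nn _ (List.getElem_mem hj)
      · rw [pvSg, List.getD_eq_default _ _ (by omega)]
    by_cases h2 : 2 < t.length
    · have hlen : t.length = (t.length - 1) + 1 := by omega
      set m : Nat := t.length - 1 with hm'
      have hm2 : 2 ≤ m := by omega
      rw [if_pos h2, if_neg (by omega : ¬ t.length ≤ 2)]
      by_cases hc0 : mc = 0
      · subst hc0
        rw [if_pos rfl, if_neg (by simp)]
        rw [pvA0 cs t m hlen, pvBside cs t m mono nn hlen 0 (by norm_num)]
        rw [show ((0 : Int).toNat + 1) = 1 from rfl]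
        exact (pvM0 (pvP cs t) m).symm
      · by_cases hc1 : mc = 1
        · subst hc1
          rw [if_neg (by norm_num), if_pos rfl, if_neg (by simp)]
          rw [pvA1 cs t m hlen hm2, pvBside cs t m mono nn hlen 1 (by norm_num)]
          rw [show ((1 : Int).toNat + 1) = 2 from rfl]
          exact (pvM1 (pvP cs t) m hm2).symm
        · by_cases hc2 : mc = 2
          · subst hc2
            rw [if_neg (by norm_num), if_neg (by norm_num), if_pos rfl, if_neg (by simp)]
            rw [pvA2 cs t m hlen hm2, pvBside cs t m mono nn hlen 2 (by norm_num)]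
            rw [show ((2 : Int).toNat + 1) = 3 from rfl]
            exact (pvM2 (pvP cs t) m hm2).symm
          · rw [if_neg hc0, if_neg hc1, if_neg hc2, if_pos ⟨hc0, hc1, hc2⟩]
    · rw [if_neg h2, if_pos (by omega : t.length ≤ 2)]
  · rw [if_neg hn]
    rw [hnil (by omega)]
    norm_num
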